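-- pv_equiv track=rewrite | github.com/DianaLuel/GDG-Week-1 | Word_Frecuency_Analyser/word_freq_ana.py | freq_calc
-- ===== SOURCE A (Python) =====
-- def freq_calc(tokens):
--     counts = dict()
--     for token in tokens:
--         token = token.lower()  # Make the words case-insensitive
--         if token not in counts:
--             counts[token] = 1
--         else:
--             counts[token] += 1
--     return counts
-- ===== SOURCE B (Python) =====
-- def freq_calc(tokens):
--     # Iterative grouping: peel off the first remaining token, count its
--     # occurrences by filtering it out, record the run, repeat on the rest.
--     lows = [t.lower() for t in tokens]
--     counts = {}
--     while lows:
--         head = lows[0]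
--         rest = [x for x in lows if x != head]
--         counts[head] = len(lows) - len(rest)
--         lows = rest
--     return counts
-- ===== Notes on version B (the rewrite author's own statement) =====
-- stated objective: alternative
-- what changed: Replaces the dict-membership counting loop with an iterative group-by-first-occurrence pass: repeatedly take the first remaining lowercased token, obtain its count as the length drop after filtering it out, and continue on the filtered rest.
import Mathlib
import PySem

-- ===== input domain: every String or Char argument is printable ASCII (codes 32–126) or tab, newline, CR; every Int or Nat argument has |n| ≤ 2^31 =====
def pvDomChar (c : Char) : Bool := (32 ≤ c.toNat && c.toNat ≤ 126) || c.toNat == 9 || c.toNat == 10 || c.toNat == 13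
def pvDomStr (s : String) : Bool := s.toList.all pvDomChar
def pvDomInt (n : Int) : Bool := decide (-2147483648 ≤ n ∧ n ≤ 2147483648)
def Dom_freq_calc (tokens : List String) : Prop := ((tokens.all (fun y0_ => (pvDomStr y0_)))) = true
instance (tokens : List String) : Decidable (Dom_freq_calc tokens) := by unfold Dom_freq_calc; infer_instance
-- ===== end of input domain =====

-- B replaces A's dict-membership counting loop with an iterative group-by-first-occurrence
-- pass (count = length drop after filtering the token out); alternative decomposition, same results.

-- ===== PORT A =====
def freq_calc (tokens : List String) : List (String × Int) :=
  (tokens.foldl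
    (fun counts token =>
      let token := PySem.Str.lower token
      if ¬ counts.contains token then counts.insert token 1
      else counts.modify token 0 (· + 1))
    PySem.Dict.empty).items

-- ===== PORT B =====
-- the while-loop of Source B: peel the first remaining token, record (head, len lows - len rest),
-- continue on rest = lows with head filtered out (fresh keys only, so the dict is the cons list)
def freqGroup (lows : List String) : List (String × Int) :=
  match lows with
  | [] => []
  | h :: t =>
    let rest := (h :: t).filter (fun x => x != h)
    (h, PySem.List.len (h :: t) - PySem.List.len rest) :: freqGroup rest
termination_by lows.length
decreasing_by
  simp only [List.filter_cons, bne_self_eq_false, List.length_cons]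
  exact Nat.lt_succ_of_le (List.length_filter_le _ _)

def freq_calc_alt (tokens : List String) : List (String × Int) :=
  freqGroup (tokens.map (fun t => PySem.Str.lower t))

-- ===== PRECONDITION & SPEC =====
def Spec_freq_calc (tokens : List String) (out : List (String × Int)) : Prop := out = freq_calc_alt tokens
instance (tokens : List String) (out : List (String × Int)) : Decidable (Spec_freq_calc tokens out) := by unfold Spec_freq_calc; infer_instance

-- ===== CLAIM (what is proved, stated in full; the proofs are below) =====
def Claim_equal_freq_calc : Prop := ∀ (tokens : List String), Dom_freq_calc tokens → Spec_freq_calc tokens (freq_calc tokens)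

-- ===== LEMMAS AND PROOFS =====

-- A's insert-or-bump step is exactly Counter's modify step
lemma stepA_eq_modify (d : PySem.Dict String Int) (t : String) :
    (if ¬ d.contains t then d.insert t 1 else d.modify t 0 (· + 1)) = d.modify t 0 (· + 1) := by
  by_cases h : d.contains t
  · simp [h]
  · have hf : d.contains t = false := by simpa using h
    simp [hf, PySem.Dict.modify, PySem.Dict.insert]
    exact PySem.Dict.getD_of_not_contains _ _ hf

lemma freq_calc_eq_counter (tokens : List String) :
    freq_calc tokens = (PySem.Dict.counter (tokens.map (fun t => PySem.Str.lower t))).items := by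
  unfold freq_calc
  rw [PySem.Dict.counter_eq_foldl, List.foldl_map]
  have hf : (fun (counts : PySem.Dict String Int) token =>
      let token := PySem.Str.lower token
      if ¬ counts.contains token then counts.insert token 1
      else counts.modify token 0 (· + 1))
      = fun (d : PySem.Dict String Int) t => d.modify (PySem.Str.lower t) 0 (· + 1) := by
    funext d t
    exact stepA_eq_modify d (PySem.Str.lower t)
  rw [hf]

-- filtering out an element already in the accumulator does not change the Set fold
lemma foldl_add_filter (h : String) :
    ∀ (l : List String) (s : PySem.Set String), h ∈ s →
      l.foldl PySem.Set.add s = (l.filter (fun x => x != h)).foldl PySem.Set.add s := by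
  intro l
  induction l with
  | nil => intro s _; rfl
  | cons a t ih =>
    intro s hs
    by_cases ha : a = h
    · subst ha
      simp only [List.filter_cons, bne_self_eq_false, List.foldl_cons,
        PySem.Set.add_of_mem hs]
      exact ih s hs
    · have hb : (a != h) = true := by simpa using ha
      simp only [List.filter_cons, hb, if_pos, List.foldl_cons]
      exact ih (PySem.Set.add s a) (by simp [PySem.Set.mem_add, hs])

lemma ofList_cons_filter (h : String) (t : List String) :
    PySem.Set.ofList (h :: t) = h :: PySem.Set.ofList (t.filter (fun x => x != h)) := by
  have h1 : PySem.Set.ofList (h :: t) = t.foldl PySem.Set.add [h] := by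
    rw [PySem.Set.ofList_eq_foldl]; rfl
  rw [h1, foldl_add_filter h t [h] (by simp)]
  have h2 : (t.filter (fun x => x != h)).foldl PySem.Set.add [h]
      = PySem.Set.update [h] (t.filter (fun x => x != h)) := rfl
  rw [h2, PySem.Set.update_eq_append_filter]
  have h3 : (PySem.Set.ofList (t.filter (fun x => x != h))).filter
      (fun y => !(PySem.Set.contains [h] y)) = PySem.Set.ofList (t.filter (fun x => x != h)) := by
    apply List.filter_eq_self.2
    intro y hy
    have : y ∈ t.filter (fun x => x != h) := (PySem.Set.mem_ofList _ _).1 hy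
    have hne : y ≠ h := by simpa using (List.mem_filter.1 this).2
    simp [PySem.Set.contains, hne]
  rw [h3]; rfl

-- length drop after filtering = number of occurrences
lemma length_filter_count (h : String) (l : List String) :
    l.length = (l.filter (fun x => x != h)).length + l.count h := by
  induction l with
  | nil => rfl
  | cons a t ih =>
    by_cases ha : a = h
    · subst ha; simp [List.count_cons_self, ih]; omega
    · simp [ha, List.count_cons_of_ne ha, ih]; omega

lemma freqGroup_eq (l : List String) :
    freqGroup l = (PySem.Set.ofList l).map (fun k => (k, (l.count k : Int))) := by
  induction l using freqGroup.induct with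
  | case1 => simp [freqGroup]
  | case2 h t rest ih =>
    rw [freqGroup, ofList_cons_filter h t, List.map_cons]
    have hfc : (h :: t).filter (fun x => x != h) = t.filter (fun x => x != h) := by
      simp
    have hrest : rest = t.filter (fun x => x != h) := hfc
    congr 1
    · -- head pair: the length drop is the count of h
      have hl := length_filter_count h (h :: t)
      rw [hfc] at hl
      have e2 : PySem.List.len (h :: t) - PySem.List.len rest = (((h :: t).count h : Nat) : Int) := by
        rw [hrest]
        simp only [PySem.List.len_eq]
        omega
      rw [e2]
    · rw [ih, hrest]
      apply List.map_congr_left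
      intro k hk
      have hkm : k ∈ t.filter (fun x => x != h) := (PySem.Set.mem_ofList _ _).1 hk
      have hne : k ≠ h := by simpa using (List.mem_filter.1 hkm).2
      have hcf : (t.filter (fun x => x != h)).count k = t.count k :=
        List.count_filter (by simpa using hne)
      rw [hcf]
      simp [Ne.symm hne]

-- ===== VERDICT (by name: the statement is the Claim_ definition above) =====
theorem freq_calc_spec : Claim_equal_freq_calc := by
  intro tokens _
  unfold Spec_freq_calc freq_calc_alt
  rw [freq_calc_eq_counter, freqGroup_eq, PySem.Dict.items_counter]
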